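-- pv_equiv track=rewrite | github.com/AlgorithmSWUtudy/Algorithm-SWUtudy | gut27/Codingtest/비밀지도.py | solution
-- ===== SOURCE A (Python) =====
-- def change(num,n):
--     q = 0
--     temp = ''
--     for _ in range(n):
--         q,r = divmod(num,2)
--         temp += str(r)
--         num = q
--     return temp[::-1]
--
-- def solution(n, arr1, arr2):
--     answer = []
--     arr_sum = [[0]*n for _ in range(n)]
--
--     # 복호화
--     for i in range(n):
--         arr1[i] = change(arr1[i],n)
--         arr2[i] = change(arr2[i],n)
--
--     for i in range(n):
--         for j in range(n):
--             # 모두 공백일 경우 ''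
--             if arr1[i][j] == '0' and arr2[i][j] == '0':
--                 arr_sum[i][j] = ' '
--             else:
--                 arr_sum[i][j] = '#'
--         answer.append(''.join(arr_sum[i]))
--
--     return answer
-- ===== SOURCE B (Python) =====
-- # B: render each row in one pass by OR-ing the two row integers and formatting the
-- # mod-2^n residue directly as an n-wide binary string translated to '#'/' '.
-- # Return value only: A also overwrites arr1/arr2 in place with the decoded strings.
-- def solution(n, arr1, arr2):
--     tr = str.maketrans('01', ' #')
--     return [format(arr1[i] % (1 << n) | arr2[i] % (1 << n), '0{}b'.format(n)).translate(tr)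
--             for i in range(n)]
-- ===== Notes on version B (the rewrite author's own statement) =====
-- stated objective: idiomatic
-- what changed: B keeps each row numeric: it ORs the two row integers' residues mod 2^n and formats the result directly as an n-wide binary string translated to '#'/' ' in a single comprehension, instead of A's two passes that first decode both grids to digit strings with a hand-written divmod loop and then compare the grids character by character.
import Mathlib
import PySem

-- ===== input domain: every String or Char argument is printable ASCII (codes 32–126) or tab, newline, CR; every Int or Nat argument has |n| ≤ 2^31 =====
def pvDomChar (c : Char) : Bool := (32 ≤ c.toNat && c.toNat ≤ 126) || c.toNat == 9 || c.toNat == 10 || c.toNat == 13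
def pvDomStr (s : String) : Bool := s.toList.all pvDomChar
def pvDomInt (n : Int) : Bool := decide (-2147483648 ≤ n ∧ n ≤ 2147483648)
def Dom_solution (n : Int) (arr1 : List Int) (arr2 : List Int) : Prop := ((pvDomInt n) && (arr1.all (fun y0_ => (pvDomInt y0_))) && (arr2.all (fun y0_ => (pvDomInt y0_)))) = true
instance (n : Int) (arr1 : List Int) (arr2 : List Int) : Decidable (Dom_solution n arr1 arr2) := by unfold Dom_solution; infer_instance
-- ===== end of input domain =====

-- B renders each row in one pass: OR the two row integers modulo 2^n and format the
-- result directly as an n-wide binary string translated to '#'/' ', instead of A's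
-- decode-both-grids-then-compare-cell-by-cell two-pass structure.  Return value only:
-- A overwrites arr1/arr2 in place with the decoded strings, B does not mutate them.

-- ===== PORT A =====
-- change(num, n): n iterations of q, r = divmod(num, 2); temp += str(r); num = q,
-- over state (q, temp, num) with temp kept as List Char (temp += str(r) appends
-- PySem.Int.toChars r); temp[::-1] is temp.reverse (PySem.Str.slice?_none_none_neg_one).
def change (num : Int) (n : Int) : String :=
  let st : Int × List Char × Int :=
    (PySem.List.pyRange 0 n 1).foldl
      (fun st _ =>
        (PySem.Int.floordiv st.2.2 2,
         st.2.1 ++ PySem.Int.toChars (PySem.Int.mod st.2.2 2),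
         PySem.Int.floordiv st.2.2 2))
      (0, [], num)
  String.ofList st.2.1.reverse

-- arr1[i] = change(arr1[i], n) rewrites each of the first n entries before the second
-- loop reads them: ported as the two decoded lists a1, a2 (arr_sum's 0-rows are fully
-- overwritten cell by cell before each join, so each row is built as a List Char).
-- the body of A's innermost loop: ' ' if arr1[i][j] == '0' and arr2[i][j] == '0' else '#'
def cellA (s1 s2 : String) (j : Int) : Char :=
  if (PySem.Str.pyGet? s1 j == some '0') && (PySem.Str.pyGet? s2 j == some '0')
  then ' ' else '#'

def solution (n : Int) (arr1 : List Int) (arr2 : List Int) : List String :=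
  let a1 := (PySem.List.pyRange 0 n 1).map (fun i => change (PySem.List.pyGetD arr1 i 0) n)
  let a2 := (PySem.List.pyRange 0 n 1).map (fun i => change (PySem.List.pyGetD arr2 i 0) n)
  (PySem.List.pyRange 0 n 1).foldl
    (fun answer i =>
      answer ++ [String.ofList
        ((PySem.List.pyRange 0 n 1).foldl
          (fun r j => r ++ [cellA (PySem.List.pyGetD a1 i "") (PySem.List.pyGetD a2 i "") j])
          [])])
    []

-- ===== PORT B =====
-- format(v, '0{}b'.format(n)) for 0 ≤ v < 2^n: exactly n binary digits, zero-padded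
-- (most significant first); exact on that domain, which `% m` guarantees below.
def binChars : Nat → Nat → List Char
  | 0, _ => []
  | w + 1, v => binChars w (v / 2) ++ [if v % 2 = 1 then '1' else '0']

-- 1 << n is evaluated only inside the comprehension, where i ∈ range(n) forces n > 0;
-- arr[i] % (1 << n) is in [0, 2^n), so Python's `|` is computed on Nat via toNat
-- (exact for nonnegative operands); ''.join over the translated digits is String.ofList.
def solution_alt (n : Int) (arr1 : List Int) (arr2 : List Int) : List String :=
  (PySem.List.pyRange 0 n 1).map (fun i =>
    String.ofList ((binChars n.toNat
        ((PySem.Int.mod (PySem.List.pyGetD arr1 i 0) (((1 <<< n.toNat : Nat) : Int))).toNat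
         ||| (PySem.Int.mod (PySem.List.pyGetD arr2 i 0) (((1 <<< n.toNat : Nat) : Int))).toNat)).map
      (fun c => if c = '1' then '#' else ' ')))

-- ===== PRECONDITION & SPEC =====
-- Exactly A's non-raising domain: for n > len(arr1) or n > len(arr2) A raises
-- IndexError on arr1[i] / arr2[i] (for n ≤ 0 both loops are empty and A returns []).
def Pre_solution (n : Int) (arr1 : List Int) (arr2 : List Int) : Prop :=
  n ≤ arr1.length ∧ n ≤ arr2.length
instance (n : Int) (arr1 : List Int) (arr2 : List Int) : Decidable (Pre_solution n arr1 arr2) := by unfold Pre_solution; infer_instance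

def pvWitness_solution : Int × List Int × List Int := (3, [4, 3, 5], [2, 6, 1])

def Spec_solution (n : Int) (arr1 : List Int) (arr2 : List Int) (out : List String) : Prop := out = solution_alt n arr1 arr2
instance (n : Int) (arr1 : List Int) (arr2 : List Int) (out : List String) : Decidable (Spec_solution n arr1 arr2 out) := by unfold Spec_solution; infer_instance

-- ===== CLAIM (what is proved, stated in full; the proofs are below) =====
def Claim_equal_solution : Prop := ∀ (n : Int) (arr1 : List Int) (arr2 : List Int), Dom_solution n arr1 arr2 → Pre_solution n arr1 arr2 → Spec_solution n arr1 arr2 (solution n arr1 arr2)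

-- ===== LEMMAS AND PROOFS =====

-- iterated floor-halving: the value `num` holds after t iterations of A's loop
def itdiv (v : Int) : Nat → Int
  | 0 => v
  | t + 1 => itdiv (PySem.Int.floordiv v 2) t

-- the little-endian digit list A's loop accumulates
def digitsLE (v : Int) : Nat → List Char
  | 0 => []
  | k + 1 => (if PySem.Int.mod v 2 = 1 then '1' else '0') :: digitsLE (PySem.Int.floordiv v 2) k

-- the common shape both ports are reduced to: row i, char j is '#' iff bit N-1-j of
-- (arr1[i] mod 2^N) or of (arr2[i] mod 2^N) is set
def gridSpec (N : Nat) (arr1 arr2 : List Int) : List String :=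
  (List.range N).map (fun i => String.ofList ((List.range N).map (fun j =>
    if (PySem.Int.mod (arr1.getD i 0) (2 ^ N)).toNat / 2 ^ (N - 1 - j) % 2 = 1
       ∨ (PySem.Int.mod (arr2.getD i 0) (2 ^ N)).toNat / 2 ^ (N - 1 - j) % 2 = 1
    then '#' else ' ')))

lemma toChars_mod_two (a : Int) :
    PySem.Int.toChars (PySem.Int.mod a 2) = [if PySem.Int.mod a 2 = 1 then '1' else '0'] := by
  rcases PySem.Int.mod_two_eq a with h | h <;> rw [h] <;> decide

lemma change_loop (l : List Int) (q v : Int) (acc : List Char) :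
    (l.foldl
      (fun (st : Int × List Char × Int) _ =>
        (PySem.Int.floordiv st.2.2 2,
         st.2.1 ++ PySem.Int.toChars (PySem.Int.mod st.2.2 2),
         PySem.Int.floordiv st.2.2 2))
      (q, acc, v)).2.1 = acc ++ digitsLE v l.length := by
  induction l generalizing q v acc with
  | nil => simp [digitsLE]
  | cons x l ih =>
    simp only [List.foldl_cons]
    rw [ih]
    simp only [List.length_cons, digitsLE, toChars_mod_two]
    simp

lemma change_eq (v : Int) (k : Nat) :
    change v (k : Int) = String.ofList (digitsLE v k).reverse := by
  simp only [change]
  rw [change_loop]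
  rw [PySem.List.length_pyRange_one]
  simp

lemma digitsLE_eq (k : Nat) (v : Int) :
    digitsLE v k = (List.range k).map (fun t => if PySem.Int.mod (itdiv v t) 2 = 1 then '1' else '0') := by
  induction k generalizing v with
  | zero => simp [digitsLE]
  | succ k ih =>
    rw [digitsLE, ih, List.range_succ_eq_map]
    simp [List.map_map, Function.comp_def, itdiv]

lemma binChars_eq (w : Nat) (x : Nat) :
    binChars w x = ((List.range w).map (fun t => if x / 2 ^ t % 2 = 1 then '1' else '0')).reverse := by
  induction w generalizing x with
  | zero => simp [binChars]
  | succ w ih =>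
    rw [binChars, ih, List.range_succ_eq_map]
    simp [List.map_map, Function.comp_def, Nat.div_div_eq_div_mul, pow_succ]
    intro a _
    rw [Nat.mul_comm]

lemma itdiv_eq_ediv (t : Nat) (v : Int) : itdiv v t = v / (2 ^ t : Int) := by
  induction t generalizing v with
  | zero => simp [itdiv]
  | succ t ih =>
    rw [itdiv, ih, PySem.Int.floordiv_eq_ediv_of_pos (by omega)]
    rw [Int.ediv_ediv_of_nonneg (by norm_num)]
    rw [pow_succ]
    ring_nf

-- A's t-th little-endian digit depends only on v mod 2^N, and is that residue's t-th bit
lemma mod_itdiv_eq (N t : Nat) (ht : t < N) (v : Int) :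
    PySem.Int.mod (itdiv v t) 2 = (((PySem.Int.mod v ((2 : Int) ^ N)).toNat / 2 ^ t % 2 : Nat) : Int) := by
  have h2N : (0 : Int) < 2 ^ N := by positivity
  have h2t : (0 : Int) < 2 ^ t := by positivity
  rw [itdiv_eq_ediv, PySem.Int.mod_eq_emod_of_pos (by norm_num), PySem.Int.mod_eq_emod_of_pos h2N]
  have hr0 : (0 : Int) ≤ v % 2 ^ N := Int.emod_nonneg v (by positivity)
  have hq : v = v % 2 ^ N + (2 ^ (N - t) * (v / 2 ^ N)) * 2 ^ t := by
    have hpow : (2 : Int) ^ (N - t) * 2 ^ t = 2 ^ N := by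
      rw [← pow_add]; congr 1; omega
    have h := Int.mul_ediv_add_emod v (2 ^ N)
    linear_combination -h - v / 2 ^ N * hpow
  have hdiv : v / 2 ^ t = v % 2 ^ N / 2 ^ t + 2 ^ (N - t) * (v / 2 ^ N) := by
    conv_lhs => rw [hq]
    rw [Int.add_mul_ediv_right _ _ (by positivity : ((2 : Int) ^ t) ≠ 0)]
  rw [hdiv]
  obtain ⟨c, hc⟩ : (2 : Int) ∣ 2 ^ (N - t) := dvd_pow_self 2 (by omega)
  rw [hc, mul_assoc, Int.add_mul_emod_self_left]
  rw [show v % 2 ^ N = (((v % 2 ^ N).toNat : Nat) : Int) from (Int.toNat_of_nonneg hr0).symm]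
  push_cast
  rfl

lemma lor_div_mod (xa xb t : Nat) :
    ((xa ||| xb) / 2 ^ t % 2 = 1) ↔ (xa / 2 ^ t % 2 = 1 ∨ xb / 2 ^ t % 2 = 1) := by
  rw [Nat.or_div_two_pow, Nat.or_mod_two_eq_one]

lemma reverse_map_range {α : Type} (N : Nat) (f : Nat → α) :
    ((List.range N).map f).reverse = (List.range N).map (fun j => f (N - 1 - j)) := by
  apply List.ext_getElem
  · simp
  · intro i h1 h2
    simp only [List.length_map, List.length_range] at h1 h2
    rw [List.getElem_reverse]
    simp only [List.getElem_map, List.getElem_range, List.length_map, List.length_range]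

-- row of A, fully characterised
lemma change_char (v : Int) (N j : Nat) (hj : j < N) :
    (digitsLE v N).reverse[j]? =
      some (if (PySem.Int.mod v (2 ^ N)).toNat / 2 ^ (N - 1 - j) % 2 = 1 then '1' else '0') := by
  rw [digitsLE_eq, reverse_map_range]
  rw [List.getElem?_eq_getElem (by simpa using hj)]
  simp only [List.getElem_map, List.getElem_range]
  rw [mod_itdiv_eq N (N - 1 - j) (by omega)]
  simp only [Nat.cast_eq_one]

lemma foldl_rows {β : Type} (N : Nat) (g : Int → β) :
    (PySem.List.pyRange 0 (N : Int) 1).foldl (fun acc i => acc ++ [g i]) ([] : List β) =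
      (List.range N).map (fun (k : Nat) => g (k : Int)) := by
  rw [PySem.List.pyRange_zero, Int.toNat_natCast, List.foldl_map,
      PySem.List.foldl_append_singleton_eq_map, List.nil_append]

lemma cellA_eq (v w : Int) (N j : Nat) (hj : j < N) :
    cellA (String.ofList (digitsLE v N).reverse) (String.ofList (digitsLE w N).reverse) (j : Int) =
      (if (PySem.Int.mod v (2 ^ N)).toNat / 2 ^ (N - 1 - j) % 2 = 1
          ∨ (PySem.Int.mod w (2 ^ N)).toNat / 2 ^ (N - 1 - j) % 2 = 1
       then '#' else ' ') := by
  unfold cellA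
  simp only [PySem.Str.pyGet?, String.toList_ofList, PySem.Chars.pyGet?,
    PySem.List.pyGet?_natCast]
  rw [change_char _ _ _ hj, change_char _ _ _ hj]
  generalize (PySem.Int.mod v (2 ^ N)).toNat / 2 ^ (N - 1 - j) % 2 = x
  generalize (PySem.Int.mod w (2 ^ N)).toNat / 2 ^ (N - 1 - j) % 2 = y
  by_cases hx : x = 1 <;> by_cases hy : y = 1 <;> simp [hx, hy]

set_option maxHeartbeats 1000000 in
lemma solutionA_eq_gridSpec (N : Nat) (arr1 arr2 : List Int) :
    solution (N : Int) arr1 arr2 = gridSpec N arr1 arr2 := by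
  simp only [solution]
  rw [foldl_rows]
  unfold gridSpec
  refine List.map_congr_left ?_
  intro i hi
  simp only [List.mem_range] at hi
  rw [foldl_rows]
  congr 1
  refine List.map_congr_left ?_
  intro j hj
  simp only [List.mem_range] at hj
  rw [PySem.List.pyGetD_map_pyRange _ N i _ hi, PySem.List.pyGetD_map_pyRange _ N i _ hi]
  rw [PySem.List.pyGetD_natCast, PySem.List.pyGetD_natCast]
  rw [change_eq, change_eq]
  rw [cellA_eq _ _ _ _ hj]

lemma rowB_eq (N : Nat) (a b : Int) :
    (binChars N ((PySem.Int.mod a (((1 <<< N : Nat) : Int))).toNat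
        ||| (PySem.Int.mod b (((1 <<< N : Nat) : Int))).toNat)).map
      (fun c => if c = '1' then '#' else ' ')
      = (List.range N).map (fun j =>
          if (PySem.Int.mod a (2 ^ N)).toNat / 2 ^ (N - 1 - j) % 2 = 1
             ∨ (PySem.Int.mod b (2 ^ N)).toNat / 2 ^ (N - 1 - j) % 2 = 1
          then '#' else ' ') := by
  rw [Nat.one_shiftLeft]
  simp only [Nat.cast_pow, Nat.cast_ofNat]
  rw [binChars_eq, List.map_reverse, List.map_map, reverse_map_range]
  refine List.map_congr_left ?_
  intro j hj
  simp only [Function.comp_def]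
  by_cases h : (PySem.Int.mod a (2 ^ N)).toNat / 2 ^ (N - 1 - j) % 2 = 1
      ∨ (PySem.Int.mod b (2 ^ N)).toNat / 2 ^ (N - 1 - j) % 2 = 1
  · rw [if_pos ((lor_div_mod _ _ _).mpr h), if_pos h]
    decide
  · rw [if_neg (fun hc => h ((lor_div_mod _ _ _).mp hc)), if_neg h]
    decide

lemma solutionB_eq_gridSpec (N : Nat) (arr1 arr2 : List Int) :
    solution_alt (N : Int) arr1 arr2 = gridSpec N arr1 arr2 := by
  simp only [solution_alt, Int.toNat_natCast]
  rw [PySem.List.pyRange_zero, Int.toNat_natCast, List.map_map]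
  unfold gridSpec
  refine List.map_congr_left ?_
  intro i hi
  simp only [List.mem_range] at hi
  simp only [Function.comp_def]
  rw [PySem.List.pyGetD_natCast, PySem.List.pyGetD_natCast]
  congr 1
  rw [rowB_eq]

-- ===== VERDICT (by name: the statement is the Claim_ definition above) =====
theorem solution_spec : Claim_equal_solution := by
  intro n arr1 arr2 _ hpre
  obtain ⟨h1, h2⟩ := hpre
  by_cases hn : 0 ≤ n
  · obtain ⟨N, rfl⟩ : ∃ N : Nat, n = (N : Int) := ⟨n.toNat, (Int.toNat_of_nonneg hn).symm⟩
    unfold Spec_solution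
    rw [solutionA_eq_gridSpec N arr1 arr2, solutionB_eq_gridSpec N arr1 arr2]
  · have hnil : PySem.List.pyRange 0 n 1 = [] := PySem.List.pyRange_one_eq_nil (by omega)
    unfold Spec_solution
    simp [solution, solution_alt, hnil]
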